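-- pv_equiv track=rewrite | github.com/EfazAhmed/CodeSignal-Arcade | The Core/30_apple_boxes.py | solution
-- ===== SOURCE A (Python) =====
-- def solution(k):
--     red = 0
--     yellow = 0
--     for i in range(1, k+1):
--         if pow(i, 2) % 2 != 0:
--             red += pow(i, 2)
--         else:
--             yellow += pow(i, 2)
--     return yellow - red
-- ===== SOURCE B (Python) =====
-- def solution(k):
--     # closed form: the alternating sum of squares equals k*(k+1)//2, negated when k is odd
--     if k <= 0:
--         return 0
--     t = k * (k + 1) // 2
--     return t if k % 2 == 0 else -t
-- ===== Notes on version B (the rewrite author's own statement) =====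
-- stated objective: faster
-- what changed: Replaced the O(k) loop accumulating odd/even squares with the closed-form alternating-sum formula k*(k+1)//2, negated for odd k.
import Mathlib
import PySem

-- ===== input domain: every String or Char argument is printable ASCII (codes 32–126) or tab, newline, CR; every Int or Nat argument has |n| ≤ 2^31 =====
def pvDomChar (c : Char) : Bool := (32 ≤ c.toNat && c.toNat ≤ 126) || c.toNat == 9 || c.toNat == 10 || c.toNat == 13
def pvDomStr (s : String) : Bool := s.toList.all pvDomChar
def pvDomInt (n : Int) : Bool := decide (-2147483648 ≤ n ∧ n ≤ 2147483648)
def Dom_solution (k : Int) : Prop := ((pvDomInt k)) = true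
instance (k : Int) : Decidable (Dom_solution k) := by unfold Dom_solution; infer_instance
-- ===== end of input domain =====

-- B replaces A's O(k) accumulation loop with the closed-form formula k*(k+1)//2 with sign from the parity of k (objective: faster).

-- ===== PORT A =====
-- loop body of A's for-loop: add i**2 to red if odd, else to yellow; state = (red, yellow)
def pvStepA (s : Int × Int) (i : Int) : Int × Int :=
  if PySem.Int.mod (i ^ 2) 2 ≠ 0 then (s.1 + i ^ 2, s.2) else (s.1, s.2 + i ^ 2)

def solution (k : Int) : Int :=
  let st := (PySem.List.pyRange 1 (k + 1) 1).foldl pvStepA (0, 0)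
  st.2 - st.1

-- ===== PORT B =====
def solution_alt (k : Int) : Int :=
  if k ≤ 0 then 0
  else
    let t := PySem.Int.floordiv (k * (k + 1)) 2
    if PySem.Int.mod k 2 == 0 then t else -t

-- ===== PRECONDITION & SPEC =====
def Spec_solution (k : Int) (out : Int) : Prop := out = solution_alt k
instance (k : Int) (out : Int) : Decidable (Spec_solution k out) := by unfold Spec_solution; infer_instance

-- ===== CLAIM (what is proved, stated in full; the proofs are below) =====
def Claim_equal_solution : Prop := ∀ (k : Int), Dom_solution k → Spec_solution k (solution k)

-- ===== LEMMAS AND PROOFS =====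

-- closed form of B on nonnegative casts, division carried out exactly
theorem alt_eq_nat (n : Nat) :
    solution_alt (n : Int) =
      if n % 2 = 0 then ((n : Int) * (n + 1)) / 2 else -(((n : Int) * (n + 1)) / 2) := by
  unfold solution_alt
  rcases Nat.eq_zero_or_pos n with h0 | hp
  · subst h0; norm_num
  · rw [if_neg (by omega : ¬ ((n : Int) ≤ 0))]
    rw [PySem.Int.floordiv_eq_ediv_of_pos (by norm_num), PySem.Int.mod_eq_emod_of_pos (by norm_num)]
    rcases Nat.even_or_odd n with ⟨a, ha⟩ | ⟨a, ha⟩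
    · have hm : (n : Int) % 2 = 0 := by omega
      simp [hm, if_pos (by omega : n % 2 = 0)]
    · have hm : (n : Int) % 2 = 1 := by omega
      rw [if_neg (by simp [hm]), if_neg (by omega : ¬ n % 2 = 0)]

theorem key (n : Nat) (s : Int × Int) :
    (((PySem.List.pyRange 1 ((n : Int) + 1) 1).foldl pvStepA s).2
      - ((PySem.List.pyRange 1 ((n : Int) + 1) 1).foldl pvStepA s).1)
      = s.2 - s.1 + solution_alt (n : Int) := by
  induction n generalizing s with
  | zero =>
      rw [PySem.List.pyRange_one_eq_nil (by norm_num)]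
      simp [solution_alt]
  | succ m ih =>
      have hsplit : PySem.List.pyRange 1 ((m : Int) + 1 + 1) 1
          = PySem.List.pyRange 1 ((m : Int) + 1) 1 ++ [((m : Int) + 1)] := by
        exact PySem.List.pyRange_one_succ_right (by omega)
      push_cast
      rw [hsplit, List.foldl_append]
      simp only [List.foldl_cons, List.foldl_nil]
      have halt : solution_alt ((m : Int) + 1)
          = if (m + 1) % 2 = 0 then (((m : Int) + 1) * ((m : Int) + 1 + 1)) / 2
            else -((((m : Int) + 1) * ((m : Int) + 1 + 1)) / 2) := by
        have := alt_eq_nat (m + 1); push_cast at this; convert this using 2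
      rw [halt]
      have ihm := ih s
      rw [alt_eq_nat m] at ihm
      set st := (PySem.List.pyRange 1 ((m : Int) + 1) 1).foldl pvStepA s with hst
      unfold pvStepA
      rw [PySem.Int.mod_eq_emod_of_pos (by norm_num)]
      rcases Nat.even_or_odd m with ⟨a, ha⟩ | ⟨a, ha⟩
      · -- m even, m+1 odd: square odd, red branch
        have hm2 : (m : Int) = 2 * a := by push_cast [ha]; ring
        have hmod : ((m : Int) + 1) ^ 2 % 2 ≠ 0 := by rw [hm2]; ring_nf; omega
        rw [if_pos (by simpa using hmod)]

        rw [if_pos (by omega : m % 2 = 0)] at ihm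
        have hA : ((m : Int) * (m + 1)) / 2 = (a : Int) * (m + 1) := by
          rw [show (m : Int) * (m + 1) = 2 * ((a : Int) * (m + 1)) by rw [hm2]; ring,
            Int.mul_ediv_cancel_left _ (by norm_num)]
        have hB : (((m : Int) + 1) * ((m : Int) + 1 + 1)) / 2
            = ((m : Int) + 1) * ((a : Int) + 1) := by
          rw [show ((m : Int) + 1) * ((m : Int) + 1 + 1)
              = 2 * (((m : Int) + 1) * ((a : Int) + 1)) by rw [hm2]; ring,
            Int.mul_ediv_cancel_left _ (by norm_num)]
        rw [if_neg (by omega : ¬ (m + 1) % 2 = 0), hB]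
        rw [hA] at ihm
        rw [hm2] at ihm ⊢
        linear_combination ihm
      · -- m odd, m+1 even: square even, yellow branch
        have hm2 : (m : Int) = 2 * a + 1 := by push_cast [ha]; ring
        have hmod : ((m : Int) + 1) ^ 2 % 2 = 0 := by rw [hm2]; ring_nf; omega
        rw [if_neg (by simpa using hmod)]

        rw [if_neg (by omega : ¬ m % 2 = 0)] at ihm
        have hA : ((m : Int) * (m + 1)) / 2 = (m : Int) * ((a : Int) + 1) := by
          rw [show (m : Int) * (m + 1) = 2 * ((m : Int) * ((a : Int) + 1)) by rw [hm2]; ring,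
            Int.mul_ediv_cancel_left _ (by norm_num)]
        have hB : (((m : Int) + 1) * ((m : Int) + 1 + 1)) / 2
            = ((a : Int) + 1) * ((m : Int) + 2) := by
          rw [show ((m : Int) + 1) * ((m : Int) + 1 + 1)
              = 2 * (((a : Int) + 1) * ((m : Int) + 2)) by rw [hm2]; ring,
            Int.mul_ediv_cancel_left _ (by norm_num)]
        rw [if_pos (by omega : (m + 1) % 2 = 0), hB]
        rw [hA] at ihm
        rw [hm2] at ihm ⊢
        linear_combination ihm

-- ===== VERDICT (by name: the statement is the Claim_ definition above) =====
theorem solution_spec : Claim_equal_solution := by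
  intro k _
  unfold Spec_solution solution
  rcases (by omega : k ≤ 0 ∨ 0 < k) with hk | hk
  · rw [PySem.List.pyRange_one_eq_nil (by omega)]
    simp [solution_alt, hk]
  · have hkn : k = ((k.toNat : Nat) : Int) := by omega
    rw [hkn]
    have := key k.toNat (0, 0)
    simp only [] at this ⊢
    omega
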